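-- pv_equiv track=rewrite | github.com/Ameer-Hamza-Khetran/mitit_2025_practice | mitit.py | is_good_contest_name
-- ===== SOURCE A (Python) =====
-- def is_good_contest_name(s):
--     n = len(s)
--     for b_len in range(1, n):  # Possible lengths of B
--         if n >= 2 * b_len + 1:  # Ensure we have enough characters for ABB
--             # Get the two parts of B
--             part1 = s[n - 2 * b_len:n - b_len]
--             part2 = s[n - b_len:]
--             # Check if they are equal
--             if part1 == part2:
--                 return "YES"
--     return "NO"
-- ===== SOURCE B (Python) =====
-- def is_good_contest_name(s):
--     # Z-function on the reversed string: z[b] >= b  iff the last 2b chars form BB.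
--     n = len(s)
--     r = s[::-1]
--     z = [0] * n
--     l = 0
--     rr = 0
--     for i in range(1, n):
--         k = min(rr - i, z[i - l]) if i < rr else 0
--         while i + k < n and r[k] == r[i + k]:
--             k += 1
--         z[i] = k
--         if i + k > rr:
--             l = i
--             rr = i + k
--     for b in range(1, (n - 1) // 2 + 1):
--         if z[b] >= b:
--             return "YES"
--     return "NO"
-- ===== Notes on version B (the rewrite author's own statement) =====
-- stated objective: alternative
-- what changed: Replaces the try-every-split slice comparison with a single Z-function pass over the reversed string, then reads off whether any split length b has z[b] >= b.
import Mathlib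
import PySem

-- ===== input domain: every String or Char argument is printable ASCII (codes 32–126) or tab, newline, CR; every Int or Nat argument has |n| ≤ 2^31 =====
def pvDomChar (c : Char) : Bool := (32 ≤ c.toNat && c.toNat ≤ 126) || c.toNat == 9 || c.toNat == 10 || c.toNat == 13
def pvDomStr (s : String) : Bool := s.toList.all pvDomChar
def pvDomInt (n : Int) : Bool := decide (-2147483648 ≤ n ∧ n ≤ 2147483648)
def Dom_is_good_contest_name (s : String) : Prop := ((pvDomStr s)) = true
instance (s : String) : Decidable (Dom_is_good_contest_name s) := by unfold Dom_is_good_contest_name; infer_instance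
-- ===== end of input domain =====

-- B replaces A's try-every-split slice comparison with a single Z-function pass
-- over the reversed string (objective: alternative algorithm).

-- ===== PORT A =====
-- the 'for b_len in range(1, n): … return "YES" … / return "NO"' loop, early return as recursion
def loopA (t : List Char) (n : Int) : List Int → String
  | [] => "NO"
  | b :: bs =>
    if n ≥ 2 * b + 1 then
      if PySem.List.slice t (some (n - 2 * b)) (some (n - b)) =
         PySem.List.slice t (some (n - b)) none then "YES"
      else loopA t n bs
    else loopA t n bs

def is_good_contest_name (s : String) : String :=
  let t := s.toList
  let n : Int := PySem.List.len t
  loopA t n (PySem.List.pyRange 1 n 1)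

-- ===== PORT B =====
-- the inner 'while i + k < n and r[k] == r[i + k]: k += 1'
def zext (t : List Char) (i : Nat) (k : Nat) : Nat :=
  if i + k < t.length ∧ t.getD k ' ' = t.getD (i + k) ' ' then zext t i (k + 1) else k
termination_by t.length - (i + k)
decreasing_by omega

-- one iteration of the Z-function loop body (state: z, l, rr)
def zstep (t : List Char) (st : List Nat × Nat × Nat) (i : Nat) : List Nat × Nat × Nat :=
  let z := st.1; let l := st.2.1; let rr := st.2.2
  let k0 := if i < rr then min (rr - i) (z.getD (i - l) 0) else 0
  let k := zext t i k0
  let z' := z.set i k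
  if i + k > rr then (z', i, i + k) else (z', l, rr)

-- the final 'for b in range(1, (n - 1) // 2 + 1): … return "YES" … / return "NO"'
def loopB (z : List Nat) : List Nat → String
  | [] => "NO"
  | b :: bs => if z.getD b 0 ≥ b then "YES" else loopB z bs

def is_good_contest_name_alt (s : String) : String :=
  let t := s.toList.reverse
  let n := t.length
  let st := (List.range' 1 (n - 1)).foldl (zstep t) (List.replicate n 0, 0, 0)
  loopB st.1 (List.range' 1 ((n - 1) / 2))

-- ===== PRECONDITION & SPEC =====
def Spec_is_good_contest_name (s : String) (out : String) : Prop := out = is_good_contest_name_alt s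
instance (s : String) (out : String) : Decidable (Spec_is_good_contest_name s out) := by unfold Spec_is_good_contest_name; infer_instance

-- ===== CLAIM (what is proved, stated in full; the proofs are below) =====
def Claim_equal_is_good_contest_name : Prop := ∀ (s : String), Dom_is_good_contest_name s → Spec_is_good_contest_name s (is_good_contest_name s)

-- ===== LEMMAS AND PROOFS =====

-- length of the longest common prefix
def lcp : List Char → List Char → Nat
  | a :: as, b :: bs => if a = b then lcp as bs + 1 else 0
  | _, _ => 0

theorem lcp_le_right : ∀ (a b : List Char), lcp a b ≤ b.length := by
  intro a
  induction a with
  | nil => intro b; cases b <;> simp [lcp]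
  | cons x as ih =>
    intro b; cases b with
    | nil => simp [lcp]
    | cons y bs => simp only [lcp]; split <;> simp [ih bs]

theorem lcp_getD : ∀ (a b : List Char) (j : Nat) (d : Char), j < lcp a b →
    a.getD j d = b.getD j d := by
  intro a
  induction a with
  | nil => intro b j d h; cases b <;> simp [lcp] at h
  | cons x as ih =>
    intro b j d h
    cases b with
    | nil => simp [lcp] at h
    | cons y bs =>
      simp only [lcp] at h
      split at h
      · cases j with
        | zero => simpa using ‹x = y›
        | succ j' => simpa using ih bs j' d (by omega)
      · omega

theorem lcp_stop : ∀ (a b : List Char) (d : Char), lcp a b < a.length → lcp a b < b.length →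
    a.getD (lcp a b) d ≠ b.getD (lcp a b) d := by
  intro a
  induction a with
  | nil => intro b d h _; simp at h
  | cons x as ih =>
    intro b d h1 h2
    cases b with
    | nil => simp at h2
    | cons y bs =>
      by_cases hxy : x = y
      · simp only [lcp, if_pos hxy] at h1 h2 ⊢
        simp only [List.length_cons] at h1 h2
        simpa using ih bs d (by omega) (by omega)
      · simp only [lcp, if_neg hxy]
        simpa using hxy

theorem lcp_ge : ∀ (a b : List Char) (k : Nat) (d : Char), k ≤ a.length → k ≤ b.length →
    (∀ j, j < k → a.getD j d = b.getD j d) → k ≤ lcp a b := by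
  intro a
  induction a with
  | nil => intro b k d h _ _; simp at h; omega
  | cons x as ih =>
    intro b k d h1 h2 hj
    cases b with
    | nil => simp at h2; omega
    | cons y bs =>
      cases k with
      | zero => omega
      | succ k' =>
        have hxy : x = y := by simpa using hj 0 (by omega)
        simp only [lcp, if_pos hxy]
        have := ih bs k' d (by simpa using h1) (by simpa using h2)
          (fun j hjk => by simpa using hj (j + 1) (by omega))
        omega

theorem lcp_ge_iff_take : ∀ (a b : List Char) (k : Nat), k ≤ a.length → k ≤ b.length →
    (k ≤ lcp a b ↔ a.take k = b.take k) := by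
  intro a
  induction a with
  | nil => intro b k h1 _; simp at h1; subst h1; simp
  | cons x as ih =>
    intro b k h1 h2
    cases b with
    | nil => simp at h2; subst h2; simp
    | cons y bs =>
      cases k with
      | zero => simp
      | succ k' =>
        simp only [lcp, List.take_succ_cons, List.cons.injEq]
        by_cases hxy : x = y
        · rw [if_pos hxy]
          have hih := ih bs k' (by simpa using h1) (by simpa using h2)
          constructor
          · intro h; exact ⟨hxy, hih.mp (by omega)⟩
          · rintro ⟨-, h⟩; have := hih.mpr h; omega
        · rw [if_neg hxy]
          constructor
          · intro h; omega
          · rintro ⟨h, -⟩; exact absurd h hxy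

-- getD through drop
theorem getD_drop (t : List Char) (i j : Nat) (d : Char) :
    (t.drop i).getD j d = t.getD (i + j) d := by
  simp [List.getD_eq_getElem?_getD, List.getElem?_drop]

-- the while loop computes exactly the lcp of t and t.drop i, from any start ≤ it
theorem zext_eq_lcp (t : List Char) (i : Nat) :
    ∀ k, k ≤ lcp t (t.drop i) → zext t i k = lcp t (t.drop i) := by
  intro k hk
  have hLd : lcp t (t.drop i) ≤ t.length - i := by
    have := lcp_le_right t (t.drop i); simpa [List.length_drop] using this
  induction hn : lcp t (t.drop i) - k generalizing k with
  | zero =>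
    have hkL : k = lcp t (t.drop i) := by omega
    rw [zext, if_neg]
    · exact hkL
    rintro ⟨hlen, heq⟩
    rw [hkL] at hlen heq
    have hL1 : lcp t (t.drop i) < t.length := by omega
    have hL2 : lcp t (t.drop i) < (t.drop i).length := by simp [List.length_drop]; omega
    exact lcp_stop t (t.drop i) ' ' hL1 hL2 (by rw [getD_drop]; exact heq)
  | succ m ihm =>
    have hklt : k < lcp t (t.drop i) := by omega
    rw [zext, if_pos]
    · exact ihm (k + 1) (by omega) (by omega)
    · constructor
      · omega
      · have := lcp_getD t (t.drop i) k ' ' hklt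
        rwa [getD_drop] at this

-- invariant of the Z loop
def ZInv (t : List Char) (i : Nat) (st : List Nat × Nat × Nat) : Prop :=
  st.1.length = t.length ∧
  (∀ j, 1 ≤ j → j < i → st.1.getD j 0 = lcp t (t.drop j)) ∧
  st.2.1 < i ∧ st.2.2 ≤ t.length ∧
  st.2.2 - st.2.1 ≤ lcp t (t.drop st.2.1) ∧
  (0 < st.2.2 → 1 ≤ st.2.1)

-- what one iteration does once the new z-value is known to be the lcp
theorem zstep_after (t : List Char) (z : List Nat) (l rr i : Nat)
    (hi : 1 ≤ i) (hin : i < t.length)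
    (hlen : z.length = t.length)
    (hz : ∀ j, 1 ≤ j → j < i → z.getD j 0 = lcp t (t.drop j))
    (hl : l < i) (hr : rr ≤ t.length)
    (hw : rr - l ≤ lcp t (t.drop l))
    (hlp : 0 < rr → 1 ≤ l) :
    ZInv t (i + 1) (if i + lcp t (t.drop i) > rr
      then (z.set i (lcp t (t.drop i)), i, i + lcp t (t.drop i))
      else (z.set i (lcp t (t.drop i)), l, rr)) := by
  have hLd : lcp t (t.drop i) ≤ t.length - i := by
    have := lcp_le_right t (t.drop i); simpa [List.length_drop] using this
  have hset_len : (z.set i (lcp t (t.drop i))).length = t.length := by simp [hlen]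
  have hset_get : ∀ j, 1 ≤ j → j < i + 1 →
      (z.set i (lcp t (t.drop i))).getD j 0 = lcp t (t.drop j) := by
    intro j hj1 hj2
    by_cases hji : j = i
    · subst hji
      simp [List.getD_eq_getElem?_getD, hlen, hin]
    · rw [List.getD_eq_getElem?_getD, List.getElem?_set, if_neg (by omega),
        ← List.getD_eq_getElem?_getD]
      exact hz j hj1 (by omega)
  split
  · next hgt =>
    dsimp only [ZInv]
    exact ⟨hset_len, hset_get, by omega, by omega, by omega, fun _ => hi⟩
  · next hle =>
    dsimp only [ZInv]
    exact ⟨hset_len, hset_get, by omega, hr, hw, hlp⟩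

theorem zstep_inv (t : List Char) (i : Nat) (st : List Nat × Nat × Nat)
    (hi : 1 ≤ i) (hin : i < t.length) (h : ZInv t i st) :
    ZInv t (i + 1) (zstep t st i) := by
  obtain ⟨z, l, rr⟩ := st
  obtain ⟨hlen, hz, hl, hr, hw, hlp⟩ := h
  simp only at hlen hz hl hr hw hlp
  simp only [zstep]
  by_cases hir : i < rr
  · simp only [if_pos hir]
    have hl1 : 1 ≤ l := hlp (by omega)
    have hil : 1 ≤ i - l := by omega
    have hzil : z.getD (i - l) 0 = lcp t (t.drop (i - l)) := hz _ hil (by omega)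
    have hk0 : min (rr - i) (z.getD (i - l) 0) ≤ lcp t (t.drop i) := by
      apply lcp_ge _ _ _ ' '
      · omega
      · simp only [List.length_drop]; omega
      · intro j hj
        have hj1 : j < lcp t (t.drop (i - l)) := by omega
        have e1 : t.getD j ' ' = t.getD (i - l + j) ' ' := by
          have h' := lcp_getD t (t.drop (i - l)) j ' ' hj1
          rwa [getD_drop] at h'
        have e2 : t.getD (i - l + j) ' ' = t.getD (l + (i - l + j)) ' ' := by
          have h' := lcp_getD t (t.drop l) (i - l + j) ' ' (by omega)
          rwa [getD_drop] at h'
        rw [getD_drop, e1, e2]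
        congr 1
        omega
    rw [zext_eq_lcp t i _ hk0]
    exact zstep_after t z l rr i hi hin hlen hz hl hr hw hlp
  · simp only [if_neg hir]
    rw [zext_eq_lcp t i 0 (by omega)]
    exact zstep_after t z l rr i hi hin hlen hz hl hr hw hlp

theorem zloop_inv (t : List Char) :
    ∀ (len : Nat) (i : Nat) (st : List Nat × Nat × Nat), 1 ≤ i → i + len ≤ t.length →
    ZInv t i st → ZInv t (i + len) ((List.range' i len).foldl (zstep t) st) := by
  intro len
  induction len with
  | zero => intro i st _ _ h; simpa using h
  | succ m ih =>
    intro i st hi hbound h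
    rw [List.range'_succ, List.foldl_cons]
    have h1 := zstep_inv t i st hi (by omega) h
    have := ih (i + 1) (zstep t st i) (by omega) (by omega) h1
    simpa [Nat.add_comm, Nat.add_assoc, Nat.add_left_comm] using this

-- the z array is correct after the whole loop
theorem z_correct (t : List Char) :
    ∀ j, 1 ≤ j → j < t.length →
      ((List.range' 1 (t.length - 1)).foldl (zstep t) (List.replicate t.length 0, 0, 0)).1.getD j 0
        = lcp t (t.drop j) := by
  intro j hj1 hj2
  have hinv0 : ZInv t 1 (List.replicate t.length 0, 0, 0) :=
    ⟨by simp, fun j h1 h2 => absurd h2 (by omega), Nat.one_pos, Nat.zero_le _, Nat.zero_le _,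
      fun h => absurd h (lt_irrefl 0)⟩
  have := zloop_inv t (t.length - 1) 1 _ (by omega) (by omega) hinv0
  exact this.2.1 j hj1 (by omega)

-- loopB is the existence of a good b in its list
theorem loopB_eq_YES (z : List Nat) : ∀ (bs : List Nat),
    (loopB z bs = "YES" ↔ ∃ b ∈ bs, z.getD b 0 ≥ b) := by
  intro bs
  induction bs with
  | nil => simp [loopB]
  | cons b bs ih =>
    simp only [loopB]
    split
    · next hb =>
      constructor
      · intro _; exact ⟨b, List.mem_cons_self, hb⟩
      · intro _; rfl
    · next hb =>
      rw [ih]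
      constructor
      · rintro ⟨c, hc, hcz⟩; exact ⟨c, by simp [hc], hcz⟩
      · rintro ⟨c, hc, hcz⟩
        rcases List.mem_cons.mp hc with rfl | hmem
        · exact absurd hcz hb
        · exact ⟨c, hmem, hcz⟩

theorem loopB_cases (z : List Nat) : ∀ (bs : List Nat),
    loopB z bs = "YES" ∨ loopB z bs = "NO" := by
  intro bs
  induction bs with
  | nil => simp [loopB]
  | cons b bs ih =>
    simp only [loopB]
    split
    · left; rfl
    · exact ih

-- loopA is the existence of a good b in its list
theorem loopA_eq_YES (t : List Char) (n : Int) : ∀ (bs : List Int),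
    (loopA t n bs = "YES" ↔ ∃ b ∈ bs, n ≥ 2 * b + 1 ∧
      PySem.List.slice t (some (n - 2 * b)) (some (n - b)) =
      PySem.List.slice t (some (n - b)) none) := by
  intro bs
  induction bs with
  | nil => simp [loopA]
  | cons b bs ih =>
    simp only [loopA]
    split
    · next hn =>
      split
      · next hs =>
        constructor
        · intro _; exact ⟨b, List.mem_cons_self, hn, hs⟩
        · intro _; rfl
      · next hs =>
        rw [ih]
        constructor
        · rintro ⟨c, hc, hcc⟩; exact ⟨c, by simp [hc], hcc⟩
        · rintro ⟨c, hc, hcc⟩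
          rcases List.mem_cons.mp hc with rfl | hmem
          · exact absurd hcc.2 hs
          · exact ⟨c, hmem, hcc⟩
    · next hn =>
      rw [ih]
      constructor
      · rintro ⟨c, hc, hcc⟩; exact ⟨c, by simp [hc], hcc⟩
      · rintro ⟨c, hc, hcc⟩
        rcases List.mem_cons.mp hc with rfl | hmem
        · exact absurd hcc.1 hn
        · exact ⟨c, hmem, hcc⟩

theorem loopA_cases (t : List Char) (n : Int) : ∀ (bs : List Int),
    loopA t n bs = "YES" ∨ loopA t n bs = "NO" := by
  intro bs
  induction bs with
  | nil => simp [loopA]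
  | cons b bs ih =>
    simp only [loopA]
    split
    · split
      · left; rfl
      · exact ih
    · exact ih

-- the split condition, moved to the reversed list as an lcp bound
theorem cond_bridge (t : List Char) (bn : Nat) (hn : 2 * bn + 1 ≤ t.length) :
    (bn ≤ lcp t.reverse (t.reverse.drop bn) ↔
      (t.drop (t.length - 2 * bn)).take bn = t.drop (t.length - bn)) := by
  have h1 : bn ≤ t.reverse.length := by simp; omega
  have h2 : bn ≤ (t.reverse.drop bn).length := by simp; omega
  rw [lcp_ge_iff_take t.reverse (t.reverse.drop bn) bn h1 h2]
  rw [List.take_reverse, List.drop_reverse, List.take_reverse]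
  have e0 : (t.take (t.length - bn)).length = t.length - bn := by simp
  rw [e0, List.drop_take]
  have e2 : t.length - bn - bn = t.length - 2 * bn := by omega
  have e3 : t.length - bn - (t.length - bn - bn) = bn := by omega
  rw [e2] at e3 ⊢
  rw [e3]
  rw [List.reverse_inj]
  exact eq_comm

-- A returns "YES" exactly when some split length works (nat form)
theorem A_iff (s : String) : is_good_contest_name s = "YES" ↔
    ∃ bn : Nat, 1 ≤ bn ∧ 2 * bn + 1 ≤ s.toList.length ∧
      (s.toList.drop (s.toList.length - 2 * bn)).take bn = s.toList.drop (s.toList.length - bn) := by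
  unfold is_good_contest_name
  rw [loopA_eq_YES]
  constructor
  · rintro ⟨b, hmem, hcond, hs⟩
    rw [PySem.List.mem_pyRange_one] at hmem
    simp only [PySem.List.len_eq] at hmem hcond hs
    refine ⟨b.toNat, by omega, by omega, ?_⟩
    have e1 : (s.toList.length : Int) - 2 * b = ((s.toList.length - 2 * b.toNat : Nat) : Int) := by
      omega
    have e2 : (s.toList.length : Int) - b = ((s.toList.length - b.toNat : Nat) : Int) := by omega
    rw [e1, e2, PySem.List.slice_natCast, PySem.List.slice_from_natCast] at hs
    have e3 : s.toList.length - b.toNat - (s.toList.length - 2 * b.toNat) = b.toNat := by omega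
    rw [e3] at hs
    exact hs
  · rintro ⟨bn, hb1, hb2, hs⟩
    refine ⟨(bn : Int), ?_, by simp only [PySem.List.len_eq]; omega, ?_⟩
    · rw [PySem.List.mem_pyRange_one]
      simp only [PySem.List.len_eq]
      omega
    · simp only [PySem.List.len_eq]
      have e1 : (s.toList.length : Int) - 2 * (bn : Int)
          = ((s.toList.length - 2 * bn : Nat) : Int) := by omega
      have e2 : (s.toList.length : Int) - (bn : Int) = ((s.toList.length - bn : Nat) : Int) := by
        omega
      rw [e1, e2, PySem.List.slice_natCast, PySem.List.slice_from_natCast]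
      have e3 : s.toList.length - bn - (s.toList.length - 2 * bn) = bn := by omega
      rw [e3]
      exact hs

-- B returns "YES" exactly when some split length works (same nat form)
theorem B_iff (s : String) : is_good_contest_name_alt s = "YES" ↔
    ∃ bn : Nat, 1 ≤ bn ∧ 2 * bn + 1 ≤ s.toList.length ∧
      (s.toList.drop (s.toList.length - 2 * bn)).take bn = s.toList.drop (s.toList.length - bn) := by
  unfold is_good_contest_name_alt
  rw [loopB_eq_YES]
  have hlenrev : s.toList.reverse.length = s.toList.length := by simp
  constructor
  · rintro ⟨bn, hmem, hge⟩
    rw [List.mem_range'_1] at hmem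
    obtain ⟨hb1, hb2⟩ := hmem
    have hb3 : bn ≤ (s.toList.reverse.length - 1) / 2 := by omega
    have hb4 : 2 * bn + 1 ≤ s.toList.length := by
      have := (Nat.le_div_iff_mul_le (by omega)).mp hb3
      omega
    have hz := z_correct s.toList.reverse bn hb1 (by omega)
    rw [hz] at hge
    exact ⟨bn, hb1, hb4, (cond_bridge s.toList bn (by omega)).mp hge⟩
  · rintro ⟨bn, hb1, hb2, hs⟩
    refine ⟨bn, ?_, ?_⟩
    · rw [List.mem_range'_1]
      refine ⟨hb1, ?_⟩
      have : bn ≤ (s.toList.reverse.length - 1) / 2 := by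
        rw [Nat.le_div_iff_mul_le (by omega)]
        omega
      omega
    · rw [z_correct s.toList.reverse bn hb1 (by omega)]
      exact (cond_bridge s.toList bn (by omega)).mpr hs

theorem A_cases (s : String) : is_good_contest_name s = "YES" ∨ is_good_contest_name s = "NO" := by
  unfold is_good_contest_name
  exact loopA_cases _ _ _

theorem B_cases (s : String) :
    is_good_contest_name_alt s = "YES" ∨ is_good_contest_name_alt s = "NO" := by
  unfold is_good_contest_name_alt
  exact loopB_cases _ _

-- ===== VERDICT (by name: the statement is the Claim_ definition above) =====
theorem is_good_contest_name_spec : Claim_equal_is_good_contest_name := by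
  intro s _
  unfold Spec_is_good_contest_name
  rcases A_cases s with hA | hA <;> rcases B_cases s with hB | hB
  · rw [hA, hB]
  · exact absurd ((B_iff s).mpr ((A_iff s).mp hA)) (by rw [hB]; decide)
  · exact absurd ((A_iff s).mpr ((B_iff s).mp hB)) (by rw [hA]; decide)
  · rw [hA, hB]
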